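-- pv_equiv track=rewrite | github.com/Fzldq/Codility | 17.NumberSolitaire.py | solution
-- ===== SOURCE A (Python) =====
-- def solution(A):
--     from collections import deque
--     length = len(A)
--     A += ['out'] * 6
--     inf = float('-inf')
--     dist = [inf] * (length + 6)
--     dist[0] = A[0]
--     move = list(range(1, 7))
--     st = deque([0])
--     while st:
--         sx = st.popleft()
--         for i in move:
--             x = sx + i
--             if A[x] == 'out':
--                 continue
--             dx = dist[sx] + A[x]
--             if dx <= dist[x]:
--                 continue
--             dist[x] = dx
--             st.append(x)
--     return dist[length - 1]
-- ===== SOURCE B (Python) =====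
-- def solution(A):
--     dist = []
--     for i, a in enumerate(A):
--         if i == 0:
--             dist.append(a)
--         else:
--             dist.append(a + max(dist[max(0, i - 6):i]))
--     return dist[-1]
-- ===== Notes on version B (the rewrite author's own statement) =====
-- stated objective: faster
-- what changed: Replaced A's deque-based repeated-relaxation worklist (SPFA-style, re-enqueueing indices every time their best sum improves) by a single left-to-right DP pass computing dist[i] = A[i] + max(dist[i-6:i]).
-- outside the precondition, e.g. on solution([]): A raises IndexError, B raises IndexError
import Mathlib
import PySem

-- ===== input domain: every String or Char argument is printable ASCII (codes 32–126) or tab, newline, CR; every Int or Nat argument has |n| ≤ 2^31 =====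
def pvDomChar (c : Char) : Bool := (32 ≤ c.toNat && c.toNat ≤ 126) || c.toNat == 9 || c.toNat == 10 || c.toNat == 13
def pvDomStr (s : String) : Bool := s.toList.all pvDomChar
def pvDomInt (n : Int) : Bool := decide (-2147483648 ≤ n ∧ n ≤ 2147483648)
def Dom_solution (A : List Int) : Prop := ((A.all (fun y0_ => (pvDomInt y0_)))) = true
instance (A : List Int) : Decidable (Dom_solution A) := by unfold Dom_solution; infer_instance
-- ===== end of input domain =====

-- B replaces A's deque worklist of repeated relaxations by one left-to-right DP pass (measured
-- faster).  Python A mutates its argument in place (appends six 'out' sentinels); the equivalence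
-- proved here is about the RETURN value only.

-- ===== PORT A =====
-- dist cells hold `Option Int`: `none` is Python's float('-inf') placeholder.  It is never replaced
-- by a smaller value, and Python's `-inf + A[x] <= dist[x]` is always true, matching the `none`
-- branches below, so the port is exact on these cells.  Python pads A with six 'out' sentinels, so
-- `A[x] == 'out'` holds exactly when `len ≤ x`; the port tests `x < len` instead, and keeps only
-- the `len` real dist cells (cells past index `len` are never read by the Python either).
def pvRelax (A : List Int) (len sx : Nat) (s : List (Option Int) × List Nat) (i : Nat) :
    List (Option Int) × List Nat :=
  let x := sx + i
  if x < len then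
    match s.1.getD sx none with
    | none => s
    | some sv =>
      let dx := sv + A.getD x 0
      match s.1.getD x none with
      | none => (s.1.set x (some dx), s.2 ++ [x])
      | some dold => if dx ≤ dold then s else (s.1.set x (some dx), s.2 ++ [x])
  else s

def pvStep (A : List Int) (len sx : Nat) (dist : List (Option Int)) (q : List Nat) :
    List (Option Int) × List Nat :=
  [1, 2, 3, 4, 5, 6].foldl (pvRelax A len sx) (dist, q)

def pvLoop (A : List Int) (len : Nat) : Nat → List (Option Int) → List Nat → List (Option Int)
  | 0, dist, _ => dist
  | fuel + 1, dist, q =>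
    match q with
    | [] => dist
    | sx :: rest =>
      let s := pvStep A len sx dist rest
      pvLoop A len fuel s.1 s.2

def pvFuel (len : Nat) : Nat := (len + 1) * (len + 1) * 4294967296 + len + 2

def solution (A : List Int) : Int :=
  let len := A.length
  let dist := (List.replicate len (none : Option Int)).set 0 (some (A.getD 0 0))
  let final := pvLoop A len (pvFuel len) dist [0]
  (final.getD (len - 1) none).getD 0

-- ===== PORT B =====
def pyMaxD (l : List Int) : Int :=
  match l with
  | [] => 0
  | h :: t => t.foldl max h

def altStep (d : List Int) (a : Int) : List Int :=
  if d.isEmpty then [a] else d ++ [a + pyMaxD (d.drop (d.length - 6))]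

def solution_alt (A : List Int) : Int :=
  let dist := A.foldl altStep []
  dist.getLast?.getD 0

-- ===== PRECONDITION & SPEC =====
-- Pre_ excludes only A = [], where both Pythons raise IndexError (A reads past its six-sentinel
-- padding, B indexes an empty list).
def Pre_solution (A : List Int) : Prop := A ≠ []
instance (A : List Int) : Decidable (Pre_solution A) := by unfold Pre_solution; infer_instance
def pvWitness_solution : List Int := [1, -2, 3]
def Spec_solution (A : List Int) (out : Int) : Prop := out = solution_alt A
instance (A : List Int) (out : Int) : Decidable (Spec_solution A out) := by unfold Spec_solution; infer_instance

-- ===== CLAIM (what is proved, stated in full; the proofs are below) =====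
def Claim_equal_solution : Prop := ∀ (A : List Int), Dom_solution A → Pre_solution A → Spec_solution A (solution A)

-- ===== LEMMAS AND PROOFS =====

def best (A : List Int) : Nat → Int
  | 0 => A.getD 0 0
  | x + 1 =>
    let b0 := best A x
    let b1 := if 1 ≤ x then max b0 (best A (x - 1)) else b0
    let b2 := if 2 ≤ x then max b1 (best A (x - 2)) else b1
    let b3 := if 3 ≤ x then max b2 (best A (x - 3)) else b2
    let b4 := if 4 ≤ x then max b3 (best A (x - 4)) else b3
    let b5 := if 5 ≤ x then max b4 (best A (x - 5)) else b4
    A.getD (x + 1) 0 + b5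

def winMax (f : Nat → Int) (x : Nat) : Int :=
  let b0 := f x
  let b1 := if 1 ≤ x then max b0 (f (x - 1)) else b0
  let b2 := if 2 ≤ x then max b1 (f (x - 2)) else b1
  let b3 := if 3 ≤ x then max b2 (f (x - 3)) else b2
  let b4 := if 4 ≤ x then max b3 (f (x - 4)) else b3
  let b5 := if 5 ≤ x then max b4 (f (x - 5)) else b4
  b5


theorem best_succ (A : List Int) (x : Nat) :
    best A (x + 1) = A.getD (x + 1) 0 + winMax (best A) x := by
  simp only [best, winMax]

theorem exists_of_max (a b : Int) (P : Int → Prop) (ha : P a) (hb : P b) : P (max a b) := by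
  rcases max_choice a b with h | h <;> rw [h] <;> assumption

theorem winMax_ge (f : Nat → Int) (x j : Nat) (h1 : j ≤ x) (h2 : x ≤ j + 5) :
    f j ≤ winMax f x := by
  have hd : j = x - 0 ∨ j = x - 1 ∧ 1 ≤ x ∨ j = x - 2 ∧ 2 ≤ x ∨ j = x - 3 ∧ 3 ≤ x
      ∨ j = x - 4 ∧ 4 ≤ x ∨ j = x - 5 ∧ 5 ≤ x := by omega
  simp only [winMax]
  split_ifs with c1 c2 c3 c4 c5 <;>
    rcases hd with rfl | ⟨rfl, hc⟩ | ⟨rfl, hc⟩ | ⟨rfl, hc⟩ | ⟨rfl, hc⟩ | ⟨rfl, hc⟩ <;>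
    (try simp only [le_max_iff, le_refl, or_true, true_or]) <;> omega

theorem winMax_mem (f : Nat → Int) (x : Nat) :
    ∃ j, j ≤ x ∧ x ≤ j + 5 ∧ winMax f x = f j := by
  simp only [winMax]
  split_ifs with c1 c2 c3 c4 c5 <;>
    (repeat' apply exists_of_max (P := fun v => ∃ j, j ≤ x ∧ x ≤ j + 5 ∧ v = f j)) <;>
    first
      | exact ⟨x, by omega, by omega, rfl⟩
      | exact ⟨x - 1, by omega, by omega, rfl⟩
      | exact ⟨x - 2, by omega, by omega, rfl⟩
      | exact ⟨x - 3, by omega, by omega, rfl⟩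
      | exact ⟨x - 4, by omega, by omega, rfl⟩
      | exact ⟨x - 5, by omega, by omega, rfl⟩

theorem foldl_max_ge_init (h : Int) (t : List Int) : h ≤ t.foldl max h := by
  induction t generalizing h with
  | nil => exact le_refl _
  | cons a t ih => exact le_trans (le_max_left h a) (ih _)

theorem foldl_max_ge_mem (h y : Int) (t : List Int) (hy : y ∈ t) : y ≤ t.foldl max h := by
  induction t generalizing h with
  | nil => cases hy
  | cons a t ih =>
    rcases List.mem_cons.mp hy with rfl | hy'
    · exact le_trans (le_max_right h y) (foldl_max_ge_init _ _)
    · exact ih _ hy'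

theorem foldl_max_mem (h : Int) (t : List Int) : t.foldl max h = h ∨ t.foldl max h ∈ t := by
  induction t generalizing h with
  | nil => exact Or.inl rfl
  | cons a t ih =>
    rcases ih (max h a) with heq | hm
    · rw [List.foldl_cons, heq]
      rcases max_choice h a with h1 | h1 <;> rw [h1]
      · exact Or.inl rfl
      · exact Or.inr (List.mem_cons_self)
    · exact Or.inr (List.mem_cons_of_mem _ hm)

theorem pyMaxD_ge (l : List Int) (y : Int) (hy : y ∈ l) : y ≤ pyMaxD l := by
  cases l with
  | nil => cases hy
  | cons h t =>
    rcases List.mem_cons.mp hy with rfl | hy'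
    · exact foldl_max_ge_init _ _
    · exact foldl_max_ge_mem _ _ _ hy'

theorem pyMaxD_mem (l : List Int) (hl : l ≠ []) : pyMaxD l ∈ l := by
  cases l with
  | nil => exact absurd rfl hl
  | cons h t =>
    rcases foldl_max_mem h t with heq | hm
    · rw [pyMaxD, heq]; exact List.mem_cons_self
    · exact List.mem_cons_of_mem _ hm

theorem slice_mem_iff (f : Nat → Int) (m : Nat) (y : Int) :
    y ∈ ((List.range m).map f).drop (m - 6) ↔ ∃ j, m - 6 ≤ j ∧ j < m ∧ y = f j := by
  rw [List.mem_iff_getElem?]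
  constructor
  · rintro ⟨i, hi⟩
    rw [List.getElem?_drop, List.getElem?_map] at hi
    by_cases hlt : m - 6 + i < m
    · rw [List.getElem?_range hlt] at hi
      simp only [Option.map_some] at hi
      exact ⟨m - 6 + i, by omega, hlt, (Option.some_inj.mp hi).symm⟩
    · rw [List.getElem?_eq_none (by simp; omega)] at hi
      simp at hi
  · rintro ⟨j, h1, h2, rfl⟩
    refine ⟨j - (m - 6), ?_⟩
    rw [List.getElem?_drop, List.getElem?_map]
    have : m - 6 + (j - (m - 6)) = j := by omega
    rw [this, List.getElem?_range h2]
    rfl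

theorem slice_max_eq (f : Nat → Int) (m : Nat) (hm : 1 ≤ m) :
    pyMaxD (((List.range m).map f).drop (m - 6)) = winMax f (m - 1) := by
  apply le_antisymm
  · have hne : ((List.range m).map f).drop (m - 6) ≠ [] := by
      apply List.ne_nil_of_length_pos
      simp only [List.length_drop, List.length_map, List.length_range]
      omega
    rcases (slice_mem_iff f m _).mp (pyMaxD_mem _ hne) with ⟨j, h1, h2, hy⟩
    rw [hy]
    exact winMax_ge f (m - 1) j (by omega) (by omega)
  · rcases winMax_mem f (m - 1) with ⟨j, hj1, hj2, heq⟩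
    rw [heq]
    exact pyMaxD_ge _ _ ((slice_mem_iff f m _).mpr ⟨j, by omega, by omega, rfl⟩)

theorem alt_loop (A : List Int) (suf : List Int) : ∀ (m : Nat), 1 ≤ m → suf = A.drop m →
    List.foldl altStep ((List.range m).map (best A)) suf
      = (List.range (m + suf.length)).map (best A) := by
  induction suf with
  | nil => intro m _ _; simp
  | cons a rest ih =>
    intro m hm hdrop
    have ha : A.getD m 0 = a := by
      have h0 : (A.drop m)[0]? = some a := by rw [← hdrop]; rfl
      rw [List.getElem?_drop, Nat.add_zero] at h0
      simp [List.getD, h0]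
    have hrest : rest = A.drop (m + 1) := by
      have := congrArg List.tail hdrop.symm
      simpa [List.tail_drop] using this.symm
    have hne : ¬ ((List.range m).map (best A)).isEmpty := by
      simp [List.isEmpty_iff, List.range_eq_nil]; omega
    rw [List.foldl_cons]
    have hstep : altStep ((List.range m).map (best A)) a = (List.range (m + 1)).map (best A) := by
      rw [altStep, if_neg hne]
      have hlen : ((List.range m).map (best A)).length = m := by simp
      rw [hlen, slice_max_eq (best A) m hm]
      have : a + winMax (best A) (m - 1) = best A m := by
        have hm1 : m = (m - 1) + 1 := by omega
        rw [hm1, best_succ, ← hm1, ha]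
      rw [this, List.range_succ, List.map_append, List.map_singleton]
    rw [hstep, ih (m + 1) (by omega) hrest]
    congr 2
    simp
    omega

theorem alt_eq_best (A : List Int) (h : A ≠ []) :
    solution_alt A = best A (A.length - 1) := by
  obtain ⟨a, rest, rfl⟩ := List.exists_cons_of_ne_nil h
  show (List.foldl altStep [] (a :: rest)).getLast?.getD 0 = _
  rw [List.foldl_cons]
  have h1 : altStep [] a = (List.range 1).map (best (a :: rest)) := by
    simp [altStep, best]
  rw [h1, alt_loop (a :: rest) rest 1 (by omega) rfl]
  rw [List.getLast?_eq_getElem?]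
  simp

-- ===== small helpers =====
theorem getD_set_self (D : List (Option Int)) (x : Nat) (hx : x < D.length) (o : Option Int) :
    (D.set x o).getD x none = o := by
  simp [List.getD, hx]

theorem getD_set_ne (D : List (Option Int)) (x y : Nat) (h : x ≠ y) (o : Option Int) :
    (D.set x o).getD y none = D.getD y none := by
  simp [List.getD, List.getElem?_set_ne, h]

theorem dom_elem (A : List Int) (hA : Dom_solution A) (x : Nat) :
    -2147483648 ≤ A.getD x 0 ∧ A.getD x 0 ≤ 2147483648 := by
  by_cases hx : x < A.length
  · have hm : A.getD x 0 ∈ A := by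
      rw [List.getD_eq_getElem A 0 hx]
      exact A.getElem_mem hx
    have := (List.all_eq_true.mp hA) _ hm
    simpa [pvDomInt] using this
  · rw [List.getD_eq_default A 0 (by omega)]
    omega

theorem best_edge (A : List Int) (sx i : Nat) (h1 : 1 ≤ i) (h2 : i ≤ 6) :
    best A sx + A.getD (sx + i) 0 ≤ best A (sx + i) := by
  have hx : sx + i = (sx + i - 1) + 1 := by omega
  rw [hx, best_succ, ← hx, add_comm]
  have := winMax_ge (best A) (sx + i - 1) sx (by omega) (by omega)
  omega

theorem best_ub (A : List Int) (hA : Dom_solution A) : ∀ x : Nat, best A x ≤ ((x : Int) + 1) * 2147483648 := by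
  intro x
  induction x using Nat.strong_induction_on with
  | _ x ih =>
    match x with
    | 0 =>
      have := dom_elem A hA 0
      show best A 0 ≤ _
      rw [best]
      push_cast
      omega
    | y + 1 =>
      rw [best_succ]
      rcases winMax_mem (best A) y with ⟨j, hj1, hj2, heq⟩
      rw [heq]
      have h1 := ih j (by omega)
      have h2 := dom_elem A hA (y + 1)
      have hj : (j : Int) ≤ y := by exact_mod_cast hj1
      push_cast
      nlinarith

-- ===== invariant =====
def edgeOK (A : List Int) (D : List (Option Int)) (u i : Nat) : Prop :=
  ∀ v, D.getD u none = some v → ∃ w, D.getD (u + i) none = some w ∧ v + A.getD (u + i) 0 ≤ w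

def Basic (A : List Int) (D : List (Option Int)) : Prop :=
  D.length = A.length ∧
  D.getD 0 none = some (A.getD 0 0) ∧
  (∀ x v, x < A.length → D.getD x none = some v → v ≤ best A x) ∧
  (∀ x v, x < A.length → D.getD x none = some v → -(((x : Int) + 1) * 2147483648) ≤ v)

def weight (x : Nat) (o : Option Int) : Nat :=
  match o with
  | none => (x + 1) * 4294967296 + 1
  | some v => (((x : Int) + 1) * 2147483648 - v).toNat

def dmeasure (D : List (Option Int)) : Nat :=
  ∑ x ∈ Finset.range D.length, weight x (D.getD x none)

theorem dmeasure_set (D : List (Option Int)) (x : Nat) (hx : x < D.length) (o : Option Int) :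
    dmeasure (D.set x o) + weight x (D.getD x none) = dmeasure D + weight x o := by
  unfold dmeasure
  rw [List.length_set]
  have hmem : x ∈ Finset.range D.length := Finset.mem_range.mpr hx
  rw [← Finset.add_sum_erase _ (fun y => weight y ((D.set x o).getD y none)) hmem,
      ← Finset.add_sum_erase _ (fun y => weight y (D.getD y none)) hmem]
  have hoff : ∑ y ∈ (Finset.range D.length).erase x, weight y ((D.set x o).getD y none)
      = ∑ y ∈ (Finset.range D.length).erase x, weight y (D.getD y none) := by
    apply Finset.sum_congr rfl
    intro y hy
    rw [getD_set_ne D x y (Finset.ne_of_mem_erase hy).symm]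
  rw [hoff, getD_set_self D x hx o]
  omega

-- the two possible outcomes of one pvRelax call (no-op with the edge already relaxed, or an update)
theorem relax_cases (A : List Int) (len sx i : Nat) (s : List (Option Int) × List Nat) :
    (pvRelax A len sx s i = s ∧ (sx + i < len → edgeOK A s.1 sx i)) ∨
    (sx + i < len ∧ ∃ sv, s.1.getD sx none = some sv ∧
      (∀ dold, s.1.getD (sx + i) none = some dold → dold < sv + A.getD (sx + i) 0) ∧
      pvRelax A len sx s i =
        (s.1.set (sx + i) (some (sv + A.getD (sx + i) 0)), s.2 ++ [sx + i])) := by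
  unfold pvRelax
  by_cases hlt : sx + i < len
  · rw [if_pos hlt]
    cases hsv : s.1.getD sx none with
    | none =>
      refine Or.inl ⟨rfl, fun _ v hv => ?_⟩
      rw [hsv] at hv; cases hv
    | some sv =>
      cases hdx : s.1.getD (sx + i) none with
      | none =>
        dsimp only
        refine Or.inr ⟨hlt, sv, rfl, ?_, rfl⟩
        intro d hd
        cases hd
      | some dold =>
        dsimp only
        by_cases hle : sv + A.getD (sx + i) 0 ≤ dold
        · rw [if_pos hle]
          refine Or.inl ⟨rfl, fun _ v hv => ?_⟩
          rw [hsv] at hv; injection hv with hv'; subst hv'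
          exact ⟨dold, hdx, hle⟩
        · rw [if_neg hle]
          refine Or.inr ⟨hlt, sv, rfl, ?_, rfl⟩
          intro d hd; injection hd with hd'; omega
  · rw [if_neg hlt]
    exact Or.inl ⟨rfl, fun hc => absurd hc hlt⟩

def QOK (A : List Int) (q : List Nat) : Prop := ∀ u ∈ q, u < A.length

def Jmost (A : List Int) (sx : Nat) (D : List (Option Int)) (q : List Nat) : Prop :=
  ∀ u, u < A.length → u ∉ q → u ≠ sx → ∀ i, 1 ≤ i → i ≤ 6 → u + i < A.length → edgeOK A D u i

def Jsx (A : List Int) (sx k : Nat) (D : List (Option Int)) (q : List Nat) : Prop :=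
  sx ∉ q → ∀ i, 1 ≤ i → i ≤ k → sx + i < A.length → edgeOK A D sx i

def InnerI (A : List Int) (sx k M : Nat) (s : List (Option Int) × List Nat) : Prop :=
  Basic A s.1 ∧ QOK A s.2 ∧ Jmost A sx s.1 s.2 ∧ Jsx A sx k s.1 s.2 ∧
    dmeasure s.1 + s.2.length ≤ M

theorem relax_inner (A : List Int) (hA : Dom_solution A) (sx k M : Nat) (hsx : sx < A.length)
    (hk : k < 6) (s : List (Option Int) × List Nat) (h : InnerI A sx k M s) :
    InnerI A sx (k + 1) M (pvRelax A A.length sx s (k + 1)) := by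
  obtain ⟨⟨hlen, hzero, hubS, hlb⟩, hq, hjm, hjs, hms⟩ := h
  rcases relax_cases A A.length sx (k + 1) s with ⟨hid, hedge⟩ | ⟨hlt, sv, hsv, hstrict, heq⟩
  · rw [hid]
    refine ⟨⟨hlen, hzero, hubS, hlb⟩, hq, hjm, ?_, hms⟩
    intro hnq i h1 h2 hilen
    rcases Nat.lt_or_ge k i with hik | hik
    · have : i = k + 1 := by omega
      subst this
      exact hedge hilen
    · exact hjs hnq i h1 hik hilen
  · -- update case
    set x := sx + (k + 1) with hxdef
    set dx := sv + A.getD x 0 with hdxdef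
    have hxlen : x < A.length := hlt
    have hxlenD : x < s.1.length := by omega
    have hxn0 : x ≠ 0 := by omega
    have hxnsx : sx ≠ x := by omega
    rw [heq]
    have hDx : ∀ y : Nat, y ≠ x → (s.1.set x (some dx)).getD y none = s.1.getD y none :=
      fun y hy => getD_set_ne s.1 x y (fun hc => hy hc.symm) _
    have hDxx : (s.1.set x (some dx)).getD x none = some dx := getD_set_self s.1 x hxlenD _
    have hmono : ∀ y w, s.1.getD y none = some w →
        ∃ w', (s.1.set x (some dx)).getD y none = some w' ∧ w ≤ w' := by
      intro y w hw
      by_cases hy : y = x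
      · subst hy
        exact ⟨dx, hDxx, le_of_lt (hstrict w hw)⟩
      · exact ⟨w, by rw [hDx y hy]; exact hw, le_refl w⟩
    have hdxub : dx ≤ best A x := by
      have h1 := hubS sx sv hsx hsv
      have h2 := best_edge A sx (k + 1) (by omega) (by omega)
      rw [hdxdef, ← hxdef] at *
      omega
    have hdxlb : -(((x : Int) + 1) * 2147483648) ≤ dx := by
      have h1 := hlb sx sv hsx hsv
      have h2 := (dom_elem A hA x).1
      have hxsx : (sx : Int) + 1 ≤ (x : Int) := by
        rw [hxdef]; push_cast; omega
      rw [hdxdef]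
      nlinarith
    have hedgetrans : ∀ u i, u ≠ x → edgeOK A s.1 u i → edgeOK A (s.1.set x (some dx)) u i := by
      intro u i hu he v hv
      rw [hDx u hu] at hv
      rcases he v hv with ⟨w, hw, hle⟩
      rcases hmono (u + i) w hw with ⟨w', hw', hww⟩
      exact ⟨w', hw', le_trans hle hww⟩
    refine ⟨⟨?_, ?_, ?_, ?_⟩, ?_, ?_, ?_, ?_⟩
    · rw [List.length_set]; exact hlen
    · rw [hDx 0 (fun hc => hxn0 hc.symm)]; exact hzero
    · intro y v hy hv
      by_cases hyx : y = x
      · subst hyx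
        rw [hDxx] at hv
        injection hv with hv'
        omega
      · exact hubS y v hy (by rw [hDx y hyx] at hv; exact hv)
    · intro y v hy hv
      by_cases hyx : y = x
      · subst hyx
        rw [hDxx] at hv
        injection hv with hv'
        omega
      · exact hlb y v hy (by rw [hDx y hyx] at hv; exact hv)
    · intro u hu
      rcases List.mem_append.mp hu with h1 | h1
      · exact hq u h1
      · rw [List.mem_singleton.mp h1]; exact hxlen
    · intro u hu hnq hne i h1 h2 hilen
      have hux : u ≠ x := by
        intro hc; exact hnq (by rw [hc]; exact List.mem_append_right _ (List.mem_singleton.mpr rfl))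
      have hnq' : u ∉ s.2 := fun hc => hnq (List.mem_append_left _ hc)
      exact hedgetrans u i hux (hjm u hu hnq' hne i h1 h2 hilen)
    · intro hnq i h1 h2 hilen
      have hnq' : sx ∉ s.2 := fun hc => hnq (List.mem_append_left _ hc)
      rcases Nat.lt_or_ge k i with hik | hik
      · have : i = k + 1 := by omega
        subst this
        intro v hv
        rw [hDx sx hxnsx] at hv
        rw [hsv] at hv
        injection hv with hv'
        subst hv'
        exact ⟨dx, hDxx, le_refl _⟩
      · exact hedgetrans sx i hxnsx (hjs hnq' i h1 hik hilen)
    · -- measure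
      have hset := dmeasure_set s.1 x hxlenD (some dx)
      have hwlt : weight x (some dx) + 1 ≤ weight x (s.1.getD x none) := by
        cases hold : s.1.getD x none with
        | none =>
          show ((((x : Int) + 1) * 2147483648 - dx).toNat) + 1 ≤ (x + 1) * 4294967296 + 1
          have : (((x : Int) + 1) * 2147483648 - dx) ≤ ((x : Int) + 1) * 4294967296 := by
            push_cast at hdxlb ⊢
            omega
          have h0 : (((x : Int) + 1) * 2147483648 - dx).toNat ≤ ((x + 1) * 4294967296 : Nat) := by
            rw [Int.toNat_le]
            push_cast
            omega
          omega
        | some dold =>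
          show ((((x : Int) + 1) * 2147483648 - dx).toNat) + 1 ≤ (((x : Int) + 1) * 2147483648 - dold).toNat
          have hdlt := hstrict dold hold
          have hbu := best_ub A hA x
          have hub2 : dx ≤ ((x : Int) + 1) * 2147483648 := le_trans hdxub hbu
          omega
      have hql : (s.2 ++ [x]).length = s.2.length + 1 := by simp
      show dmeasure (s.1.set x (some dx)) + (s.2 ++ [x]).length ≤ M
      omega

def InvA (A : List Int) (D : List (Option Int)) (q : List Nat) : Prop :=
  Basic A D ∧ QOK A q ∧
    ∀ u, u < A.length → u ∉ q → ∀ i, 1 ≤ i → i ≤ 6 → u + i < A.length → edgeOK A D u i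

theorem step_inv (A : List Int) (hA : Dom_solution A) (sx : Nat) (rest : List Nat)
    (D : List (Option Int)) (hsx : sx < A.length) (h : InvA A D (sx :: rest)) :
    InvA A (pvStep A A.length sx D rest).1 (pvStep A A.length sx D rest).2 ∧
      dmeasure (pvStep A A.length sx D rest).1 + (pvStep A A.length sx D rest).2.length
        ≤ dmeasure D + rest.length := by
  obtain ⟨hb, hq, hj⟩ := h
  have h0 : InnerI A sx 0 (dmeasure D + rest.length) (D, rest) := by
    refine ⟨hb, fun u hu => hq u (List.mem_cons_of_mem _ hu), ?_, ?_, le_refl _⟩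
    · intro u hu hnq hne i h1 h2 hil
      have : u ∉ sx :: rest := by
        intro hc; rcases List.mem_cons.mp hc with hc' | hc'
        · exact hne hc'
        · exact hnq hc'
      exact hj u hu this i h1 h2 hil
    · intro _ i h1 h2 _
      omega
  have h1 := relax_inner A hA sx 0 _ hsx (by omega) _ h0
  have h2 := relax_inner A hA sx 1 _ hsx (by omega) _ h1
  have h3 := relax_inner A hA sx 2 _ hsx (by omega) _ h2
  have h4 := relax_inner A hA sx 3 _ hsx (by omega) _ h3
  have h5 := relax_inner A hA sx 4 _ hsx (by omega) _ h4
  have h6 := relax_inner A hA sx 5 _ hsx (by omega) _ h5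
  have hstep : pvStep A A.length sx D rest
      = pvRelax A A.length sx (pvRelax A A.length sx (pvRelax A A.length sx
          (pvRelax A A.length sx (pvRelax A A.length sx (pvRelax A A.length sx
            (D, rest) 1) 2) 3) 4) 5) 6 := by
    simp only [pvStep, List.foldl]
  rw [hstep]
  obtain ⟨hb', hq', hjm', hjs', hm'⟩ := h6
  refine ⟨⟨hb', hq', ?_⟩, hm'⟩
  intro u hu hnq i hi1 hi2 hil
  by_cases hne : u = sx
  · subst hne
    exact hjs' hnq i hi1 hi2 hil
  · exact hjm' u hu hnq hne i hi1 hi2 hil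

theorem fixpoint_best (A : List Int) (D : List (Option Int)) (h : InvA A D []) :
    ∀ x, x < A.length → D.getD x none = some (best A x) := by
  obtain ⟨⟨hlen, hzero, hubS, hlb⟩, _, hj⟩ := h
  intro x
  induction x using Nat.strong_induction_on with
  | _ x ih =>
    intro hx
    match x with
    | 0 =>
      rw [hzero]
      rw [show best A 0 = A.getD 0 0 by simp [best]]
    | y + 1 =>
      rcases winMax_mem (best A) y with ⟨j, hj1, hj2, heq⟩
      have hjlen : j < A.length := by omega
      have hDj := ih j (by omega) hjlen
      have hji : j + (y + 1 - j) = y + 1 := by omega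
      have hedge := hj j hjlen (List.not_mem_nil) (y + 1 - j) (by omega) (by omega)
        (by rw [hji]; exact hx)
      rcases hedge (best A j) hDj with ⟨w, hw, hle⟩
      rw [hji] at hw hle
      have hub := hubS (y + 1) w hx hw
      have hbs : best A (y + 1) = A.getD (y + 1) 0 + best A j := by
        rw [best_succ, heq]
      have : w = best A (y + 1) := by omega
      rw [hw, this]

theorem loop_correct (A : List Int) (hA : Dom_solution A) :
    ∀ (fuel : Nat) (D : List (Option Int)) (q : List Nat), InvA A D q →
      dmeasure D + q.length < fuel →
      ∀ x, x < A.length → (pvLoop A A.length fuel D q).getD x none = some (best A x) := by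
  intro fuel
  induction fuel with
  | zero => intro D q _ hm; omega
  | succ f ih =>
    intro D q hinv hm x hx
    cases q with
    | nil =>
      show D.getD x none = some (best A x)
      exact fixpoint_best A D hinv x hx
    | cons sx rest =>
      have hsx : sx < A.length := hinv.2.1 sx List.mem_cons_self
      obtain ⟨hinv', hm'⟩ := step_inv A hA sx rest D hsx hinv
      show (pvLoop A A.length f (pvStep A A.length sx D rest).1
        (pvStep A A.length sx D rest).2).getD x none = some (best A x)
      apply ih _ _ hinv' _ x hx
      have : (sx :: rest).length = rest.length + 1 := rfl
      omega

theorem getD_replicate_none (n x : Nat) :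
    ((List.replicate n (none : Option Int)).getD x none) = none := by
  simp [List.getD]

theorem solution_eq_best (A : List Int) (hA : Dom_solution A) (hne : A ≠ []) :
    solution A = best A (A.length - 1) := by
  have hlen1 : 1 ≤ A.length := List.length_pos_iff.mpr hne
  set D0 := (List.replicate A.length (none : Option Int)).set 0 (some (A.getD 0 0)) with hD0
  have hD0len : D0.length = A.length := by
    rw [hD0, List.length_set, List.length_replicate]
  have hD00 : D0.getD 0 none = some (A.getD 0 0) := by
    rw [hD0]
    exact getD_set_self _ 0 (by rw [List.length_replicate]; omega) _
  have hD0x : ∀ x : Nat, x ≠ 0 → D0.getD x none = none := by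
    intro x hx
    rw [hD0, getD_set_ne _ 0 x (fun hc => hx hc.symm), getD_replicate_none]
  have hinv : InvA A D0 [0] := by
    refine ⟨⟨hD0len, hD00, ?_, ?_⟩, ?_, ?_⟩
    · intro x v hx hv
      by_cases hx0 : x = 0
      · subst hx0
        rw [hD00] at hv
        injection hv with hv'
        rw [show best A 0 = A.getD 0 0 by simp [best]]
        omega
      · rw [hD0x x hx0] at hv; cases hv
    · intro x v hx hv
      by_cases hx0 : x = 0
      · subst hx0
        rw [hD00] at hv
        injection hv with hv'
        have := (dom_elem A hA 0).1
        push_cast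
        omega
      · rw [hD0x x hx0] at hv; cases hv
    · intro u hu
      rw [List.mem_singleton.mp hu]
      omega
    · intro u hu hnq i h1 h2 hil v hv
      have hu0 : u ≠ 0 := fun hc => hnq (by rw [hc]; exact List.mem_singleton.mpr rfl)
      rw [hD0x u hu0] at hv
      cases hv
  have hmb : dmeasure D0 + 1 < pvFuel A.length := by
    have hterm : ∀ x ∈ Finset.range D0.length,
        weight x (D0.getD x none) ≤ A.length * 4294967296 + 1 := by
      intro x hx
      have hxr : x < A.length := by rw [← hD0len]; exact Finset.mem_range.mp hx
      by_cases hx0 : x = 0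
      · subst hx0
        rw [hD00]
        show ((((0 : Nat) : Int) + 1) * 2147483648 - A.getD 0 0).toNat ≤ A.length * 4294967296 + 1
        have h1 := (dom_elem A hA 0).1
        have h2 : (((0 : Nat) : Int) + 1) * 2147483648 - A.getD 0 0 ≤ 4294967296 := by push_cast; omega
        have h3 : ((((0 : Nat) : Int) + 1) * 2147483648 - A.getD 0 0).toNat ≤ (4294967296 : Nat) := by
          rw [Int.toNat_le]; push_cast at h2 ⊢; omega
        nlinarith
      · rw [hD0x x hx0]
        show (x + 1) * 4294967296 + 1 ≤ A.length * 4294967296 + 1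
        have : x + 1 ≤ A.length := by omega
        nlinarith
    have hsum : dmeasure D0 ≤ D0.length * (A.length * 4294967296 + 1) := by
      have := Finset.sum_le_card_nsmul (Finset.range D0.length)
        (fun x => weight x (D0.getD x none)) (A.length * 4294967296 + 1) hterm
      simpa [dmeasure, mul_comm] using this
    rw [hD0len] at hsum
    unfold pvFuel
    nlinarith [hlen1]
  have hloop := loop_correct A hA (pvFuel A.length) D0 [0] hinv (by simpa using hmb)
    (A.length - 1) (by omega)
  show ((pvLoop A A.length (pvFuel A.length) D0 [0]).getD (A.length - 1) none).getD 0 = _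
  rw [hloop]
  rfl

-- ===== VERDICT (by name: the statement is the Claim_ definition above) =====
theorem solution_spec : Claim_equal_solution := by
  intro A hA hpre
  show solution A = solution_alt A
  rw [solution_eq_best A hA hpre, alt_eq_best A hpre]
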